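-- pv_equiv track=rewrite | github.com/wnstj-yang/Algorithm | Programmers/programmers_기능개발_2.py | solution
-- ===== SOURCE A (Python) =====
-- def solution(progresses, speeds):
--     answer = []
--     result = []
--     for i in range(len(speeds)):
--         percent_left = 100 - progresses[i]
--         if percent_left % speeds[i] != 0:
--             result.append(percent_left // speeds[i] + 1)
--         else:
--             result.append(percent_left // speeds[i])
--     idx = 1
--     cnt = 1
--     val = result[0]
--     while idx < len(result):
--         if val >= result[idx]:
--             idx += 1
--             cnt += 1
--         else:
--             val = result[idx]
--             idx += 1
--             answer.append(cnt)
--             cnt = 1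
--     answer.append(cnt)
--
--     return answer
-- ===== SOURCE B (Python) =====
-- def solution(progresses, speeds):
--     days = [-(-(100 - p) // s) for p, s in zip(progresses, speeds)]
--     m = days[0]
--     prefix = []
--     for d in days:
--         m = m if m >= d else d
--         prefix.append(m)
--     bounds = [i for i in range(len(days)) if i == 0 or prefix[i] != prefix[i - 1]]
--     bounds.append(len(days))
--     return [b - a for a, b in zip(bounds, bounds[1:])]
-- ===== Notes on version B (the rewrite author's own statement) =====
-- stated objective: alternative
-- what changed: Replaces A's single-pass counter/current-max state machine with a staged pipeline: ceil-divide to a days list, compute the prefix-maximum list, collect boundary indices where the prefix maximum strictly increases, and return consecutive differences of those boundaries.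
import Mathlib
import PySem

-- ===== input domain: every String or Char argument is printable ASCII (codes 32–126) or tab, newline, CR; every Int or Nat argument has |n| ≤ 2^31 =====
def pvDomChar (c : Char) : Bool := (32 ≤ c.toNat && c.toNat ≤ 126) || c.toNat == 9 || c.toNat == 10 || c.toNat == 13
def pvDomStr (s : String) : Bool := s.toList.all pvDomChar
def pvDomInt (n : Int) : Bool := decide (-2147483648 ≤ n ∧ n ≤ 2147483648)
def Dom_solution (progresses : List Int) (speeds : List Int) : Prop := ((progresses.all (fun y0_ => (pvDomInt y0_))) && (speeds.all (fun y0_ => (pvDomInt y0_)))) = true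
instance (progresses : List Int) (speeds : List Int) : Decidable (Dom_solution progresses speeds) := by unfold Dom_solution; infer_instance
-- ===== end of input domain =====

-- B replaces A's single-pass counter/current-max state machine by a staged pipeline:
-- ceil-divided days list, prefix-maximum list, boundary indices where the prefix
-- maximum strictly increases, and consecutive differences of those boundaries
-- (objective: alternative algorithm, same asymptotic cost).

-- ===== PORT A =====
-- the 'while idx < len(result)' loop of A, step for step
def solutionWhileA (result : List Int) (idx : Nat) (cnt val : Int) (answer : List Int) : List Int :=
  if _h : idx < result.length then
    if val ≥ PySem.List.pyGetD result (idx : Int) 0 then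
      solutionWhileA result (idx + 1) (cnt + 1) val answer
    else
      solutionWhileA result (idx + 1) 1 (PySem.List.pyGetD result (idx : Int) 0) (answer ++ [cnt])
  else
    answer ++ [cnt]
termination_by result.length - idx
decreasing_by all_goals omega

def solution (progresses : List Int) (speeds : List Int) : List Int :=
  let result := (PySem.List.pyRange 0 (speeds.length : Int) 1).foldl (fun result i =>
    let percent_left := 100 - PySem.List.pyGetD progresses i 0
    if PySem.Int.mod percent_left (PySem.List.pyGetD speeds i 0) ≠ 0 then
      result ++ [PySem.Int.floordiv percent_left (PySem.List.pyGetD speeds i 0) + 1]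
    else
      result ++ [PySem.Int.floordiv percent_left (PySem.List.pyGetD speeds i 0)]) []
  solutionWhileA result 1 1 (PySem.List.pyGetD result 0 0) []

-- ===== PORT B =====
def solution_alt (progresses : List Int) (speeds : List Int) : List Int :=
  let days := (progresses.zip speeds).map (fun ps => -(PySem.Int.floordiv (-(100 - ps.1)) ps.2))
  -- the 'for d in days' loop building the prefix-maximum list (state = (m, prefix))
  let st := days.foldl (fun (st : Int × List Int) d =>
      let m := if st.1 ≥ d then st.1 else d
      (m, st.2 ++ [m])) (PySem.List.pyGetD days 0 0, [])
  let prefmax := st.2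
  let bounds := ((PySem.List.pyRange 0 (days.length : Int) 1).filter
      (fun i => i == 0 || !(PySem.List.pyGetD prefmax i 0 == PySem.List.pyGetD prefmax (i - 1) 0)))
      ++ [(days.length : Int)]
  (bounds.zip (PySem.List.slice bounds (some 1) none)).map (fun ab => ab.2 - ab.1)

-- ===== PRECONDITION & SPEC =====
-- Pre_ is exactly where Python A returns: A raises IndexError on result[0] when speeds is
-- empty, IndexError on progresses[i] when progresses is shorter than speeds, and
-- ZeroDivisionError when some speed is 0.
def Pre_solution (progresses : List Int) (speeds : List Int) : Prop :=
  speeds ≠ [] ∧ speeds.length ≤ progresses.length ∧ (0 : Int) ∉ speeds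
instance (progresses : List Int) (speeds : List Int) : Decidable (Pre_solution progresses speeds) := by
  unfold Pre_solution; infer_instance

def pvWitness_solution : List Int × List Int := ([93, 30, 55], [1, 30, 5])

def Spec_solution (progresses : List Int) (speeds : List Int) (out : List Int) : Prop := out = solution_alt progresses speeds
instance (progresses : List Int) (speeds : List Int) (out : List Int) : Decidable (Spec_solution progresses speeds out) := by unfold Spec_solution; infer_instance

-- ===== CLAIM (what is proved, stated in full; the proofs are below) =====
def Claim_equal_solution : Prop := ∀ (progresses : List Int) (speeds : List Int), Dom_solution progresses speeds → Pre_solution progresses speeds → Spec_solution progresses speeds (solution progresses speeds)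

-- ===== LEMMAS AND PROOFS =====

-- ceil division agrees with A's branchy floor division, positive divisor
theorem ceil_branch_pos (a s : Int) (hs : 0 < s) :
    (if PySem.Int.mod a s ≠ 0 then PySem.Int.floordiv a s + 1 else PySem.Int.floordiv a s)
      = -(PySem.Int.floordiv (-a) s) := by
  have h := PySem.Int.floordiv_mul_add_mod a s
  have h0 := PySem.Int.mod_nonneg a hs
  have h1 := PySem.Int.mod_lt a hs
  symm
  rw [PySem.Int.neg_floordiv_neg_eq_iff_of_pos hs]
  split_ifs with hm
  · constructor <;> nlinarith [lt_of_le_of_ne h0 (Ne.symm hm)]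
  · simp only [ne_eq, not_not] at hm
    constructor <;> nlinarith

-- ceil division agrees with A's branchy floor division, any nonzero divisor
theorem ceil_branch (a s : Int) (hs : s ≠ 0) :
    (if PySem.Int.mod a s ≠ 0 then PySem.Int.floordiv a s + 1 else PySem.Int.floordiv a s)
      = -(PySem.Int.floordiv (-a) s) := by
  rcases lt_or_gt_of_ne hs with hneg | hpos
  · have e1 : PySem.Int.floordiv a s = PySem.Int.floordiv (-a) (-s) := (PySem.Int.floordiv_neg_neg a s).symm
    have e2 : PySem.Int.floordiv (-a) s = PySem.Int.floordiv a (-s) := by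
      simpa using PySem.Int.floordiv_neg_neg a (-s)
    have e3 : PySem.Int.mod a s = -(PySem.Int.mod (-a) (-s)) := by
      have h' := PySem.Int.mod_neg_neg (-a) (-s)
      simp only [neg_neg] at h'
      exact h'
    rw [e1, e2, e3]
    have hmain := ceil_branch_pos (-a) (-s) (by omega)
    rw [show -(-a) = a by ring] at hmain
    rw [← hmain]
    congr 1
    simp [neg_eq_zero]
  · exact ceil_branch_pos a s hpos

-- a map over range(len ss) of an indexwise function equals a map over zip
theorem range_map_eq_zip_map (ps ss : List Int) (h : ss.length ≤ ps.length) (g : Int → Int → Int) :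
    (PySem.List.pyRange 0 (ss.length : Int) 1).map
      (fun i => g (PySem.List.pyGetD ps i 0) (PySem.List.pyGetD ss i 0))
    = (ps.zip ss).map (fun ab => g ab.1 ab.2) := by
  apply List.ext_getElem
  · simp [PySem.List.length_pyRange_one]
    omega
  · intro k h1 h2
    have hk : k < ss.length := by
      simpa [PySem.List.length_pyRange_one] using h1
    have hkp : k < ps.length := by omega
    simp [PySem.List.getElem_pyRange_one, PySem.List.pyGetD_natCast,
      List.getD_eq_getElem?_getD, hk, hkp]

-- A's result list is B's days list
theorem result_eq_days (progresses speeds : List Int)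
    (hlen : speeds.length ≤ progresses.length) (h0 : (0 : Int) ∉ speeds) :
    (PySem.List.pyRange 0 (speeds.length : Int) 1).foldl (fun result i =>
      let percent_left := 100 - PySem.List.pyGetD progresses i 0
      if PySem.Int.mod percent_left (PySem.List.pyGetD speeds i 0) ≠ 0 then
        result ++ [PySem.Int.floordiv percent_left (PySem.List.pyGetD speeds i 0) + 1]
      else
        result ++ [PySem.Int.floordiv percent_left (PySem.List.pyGetD speeds i 0)]) []
    = (progresses.zip speeds).map (fun ps => -(PySem.Int.floordiv (-(100 - ps.1)) ps.2)) := by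
  have hfold : ∀ (l : List Int) (acc : List Int),
      l.foldl (fun result i =>
        let percent_left := 100 - PySem.List.pyGetD progresses i 0
        if PySem.Int.mod percent_left (PySem.List.pyGetD speeds i 0) ≠ 0 then
          result ++ [PySem.Int.floordiv percent_left (PySem.List.pyGetD speeds i 0) + 1]
        else
          result ++ [PySem.Int.floordiv percent_left (PySem.List.pyGetD speeds i 0)]) acc
      = acc ++ l.map (fun i =>
          let percent_left := 100 - PySem.List.pyGetD progresses i 0
          if PySem.Int.mod percent_left (PySem.List.pyGetD speeds i 0) ≠ 0 then
            PySem.Int.floordiv percent_left (PySem.List.pyGetD speeds i 0) + 1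
          else
            PySem.Int.floordiv percent_left (PySem.List.pyGetD speeds i 0)) := by
    intro l
    induction l with
    | nil => simp
    | cons x xs ih =>
      intro acc
      simp only [List.foldl_cons, List.map_cons]
      rw [ih]
      split_ifs <;> simp
  rw [hfold, List.nil_append]
  rw [← range_map_eq_zip_map progresses speeds hlen
    (fun p s => -(PySem.Int.floordiv (-(100 - p)) s))]
  apply List.map_congr_left
  intro i hi
  have hib := PySem.List.mem_pyRange_one.mp hi
  have hs : PySem.List.pyGetD speeds i 0 ∈ speeds := by
    refine PySem.List.pyGetD_mem speeds 0 ⟨by omega, by omega⟩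
  exact ceil_branch _ _ (fun h => h0 (h ▸ hs))

-- the prefix-maximum list, recursively (the loop of B with the accumulator made explicit)
def prefAux (m : Int) : List Int → List Int
  | [] => []
  | d :: ds => (if m ≥ d then m else d) :: prefAux (if m ≥ d then m else d) ds

theorem foldl_pref (l : List Int) (m : Int) (acc : List Int) :
    (l.foldl (fun (st : Int × List Int) d =>
      let m' := if st.1 ≥ d then st.1 else d
      (m', st.2 ++ [m'])) (m, acc)).2 = acc ++ prefAux m l := by
  induction l generalizing m acc with
  | nil => simp [prefAux]
  | cons d ds ih => simp [prefAux, ih]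

theorem length_prefAux (m : Int) (l : List Int) : (prefAux m l).length = l.length := by
  induction l generalizing m with
  | nil => rfl
  | cons d ds ih => simp [prefAux, ih]

theorem prefAux_getD_succ (l : List Int) (m : Int) (k : Nat) (h : k + 1 < l.length) :
    (prefAux m l).getD (k + 1) 0
      = if (prefAux m l).getD k 0 ≥ l.getD (k + 1) 0 then (prefAux m l).getD k 0
        else l.getD (k + 1) 0 := by
  induction l generalizing m k with
  | nil => simp at h
  | cons d ds ih =>
    cases k with
    | zero =>
      cases ds with
      | nil => simp at h
      | cons e es => simp [prefAux]
    | succ k =>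
      have := ih (if m ≥ d then m else d) k (by simpa using h)
      simpa [prefAux] using this

-- consecutive differences of a list of boundaries
def diffs (bs : List Int) : List Int := (bs.zip bs.tail).map (fun ab => ab.2 - ab.1)

theorem diffs_cons₂ (a b : Int) (t : List Int) :
    diffs (a :: b :: t) = (b - a) :: diffs (b :: t) := rfl

-- A's while loop emits exactly the consecutive differences of the remaining boundaries
theorem loop_eq (D pref : List Int) (hlen : pref.length = D.length)
    (hrec : ∀ k, k + 1 < D.length →
      pref.getD (k + 1) 0 = if pref.getD k 0 ≥ D.getD (k + 1) 0 then pref.getD k 0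
        else D.getD (k + 1) 0)
    (idx b : Nat) (ans : List Int) (h1 : 1 ≤ idx) (h2 : idx ≤ D.length) (hb : b < idx) :
    solutionWhileA D idx ((idx : Int) - (b : Int)) (pref.getD (idx - 1) 0) ans
      = ans ++ diffs (((b : Int) :: (PySem.List.pyRange (idx : Int) (D.length : Int) 1).filter
          (fun i => i == 0 || !(PySem.List.pyGetD pref i 0 == PySem.List.pyGetD pref (i - 1) 0)))
          ++ [(D.length : Int)]) := by
  rw [solutionWhileA]
  by_cases hidx : idx < D.length
  · rw [dif_pos hidx]
    have hcons : PySem.List.pyRange (idx : Int) (D.length : Int) 1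
        = (idx : Int) :: PySem.List.pyRange ((idx : Int) + 1) (D.length : Int) 1 :=
      PySem.List.pyRange_one_cons (by exact_mod_cast hidx)
    have hcast : ((idx : Int) + 1) = ((idx + 1 : Nat) : Int) := by push_cast; ring
    have hprev : ((idx : Int) - 1) = ((idx - 1 : Nat) : Int) := by omega
    have hrec' := hrec (idx - 1) (by omega)
    rw [show idx - 1 + 1 = idx from by omega] at hrec'
    by_cases hle : pref.getD (idx - 1) 0 ≥ D.getD idx 0
    · rw [if_pos (by simpa [PySem.List.pyGetD_natCast] using hle)]
      have hpeq : pref.getD idx 0 = pref.getD (idx - 1) 0 := by rw [hrec', if_pos hle]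
      have hp : (((idx : Int) == 0 || !(PySem.List.pyGetD pref (idx : Int) 0 == PySem.List.pyGetD pref ((idx : Int) - 1) 0))) = false := by
        rw [hprev]
        simp only [PySem.List.pyGetD_natCast, hpeq, beq_self_eq_true, Bool.not_true,
          Bool.or_false, beq_eq_false_iff_ne, ne_eq, Int.natCast_eq_zero]
        omega
      rw [hcons, List.filter_cons, if_neg (by rw [hp]; exact Bool.false_ne_true)]
      have := loop_eq D pref hlen hrec (idx + 1) b ans (by omega) (by omega) (by omega)
      rw [show ((idx + 1 : Nat) : Int) - (b : Int) = (idx : Int) - (b : Int) + 1 from by push_cast; ring,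
        show (idx + 1) - 1 = idx from by omega, hpeq] at this
      rw [← hcast] at this
      exact this
    · rw [if_neg (by simpa [PySem.List.pyGetD_natCast] using hle)]
      have hpeq : pref.getD idx 0 = D.getD idx 0 := by rw [hrec', if_neg hle]
      have hp : (((idx : Int) == 0 || !(PySem.List.pyGetD pref (idx : Int) 0 == PySem.List.pyGetD pref ((idx : Int) - 1) 0))) = true := by
        rw [hprev]
        simp only [PySem.List.pyGetD_natCast, hpeq, Bool.or_eq_true, Bool.not_eq_true',
          beq_eq_false_iff_ne, ne_eq]
        right
        intro h; rw [h] at hle; exact hle (le_refl _)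
      rw [hcons, List.filter_cons, if_pos hp]
      have := loop_eq D pref hlen hrec (idx + 1) idx (ans ++ [(idx : Int) - (b : Int)])
        (by omega) (by omega) (by omega)
      rw [show ((idx + 1 : Nat) : Int) - (idx : Int) = 1 from by push_cast; ring,
        show (idx + 1) - 1 = idx from by omega, hpeq] at this
      rw [← hcast] at this
      rw [PySem.List.pyGetD_natCast, this]
      simp only [List.cons_append, diffs_cons₂, List.append_assoc, List.nil_append]
  · rw [dif_neg hidx]
    have hn : idx = D.length := by omega
    rw [PySem.List.pyRange_one_eq_nil (by omega)]
    simp only [List.filter_nil, List.nil_append, List.cons_append]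
    rw [show ((b : Int) :: [(D.length : Int)]) = (b : Int) :: (D.length : Int) :: [] from rfl,
      diffs_cons₂]
    simp [diffs, hn]
termination_by D.length - idx
decreasing_by all_goals omega

-- ===== VERDICT (by name: the statement is the Claim_ definition above) =====
theorem solution_spec : Claim_equal_solution := by
  intro progresses speeds _hdom hpre
  obtain ⟨hne, hlen, h0⟩ := hpre
  have hn1 : 1 ≤ speeds.length := List.length_pos_of_ne_nil hne
  unfold Spec_solution solution solution_alt
  rw [result_eq_days progresses speeds hlen h0]
  set D := (progresses.zip speeds).map (fun ps => -(PySem.Int.floordiv (-(100 - ps.1)) ps.2)) with hD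
  have hdl : D.length = speeds.length := by
    rw [hD]; simp; omega
  have hDne : D ≠ [] := by
    intro h; rw [h] at hdl; simp at hdl; omega
  simp only [foldl_pref]
  set pref := prefAux (PySem.List.pyGetD D 0 0) D with hpref
  have hplen : pref.length = D.length := length_prefAux _ _
  have hrec : ∀ k, k + 1 < D.length →
      pref.getD (k + 1) 0 = if pref.getD k 0 ≥ D.getD (k + 1) 0 then pref.getD k 0
        else D.getD (k + 1) 0 := fun k hk => prefAux_getD_succ D _ k hk
  have hp0 : pref.getD 0 0 = PySem.List.pyGetD D 0 0 := by
    obtain ⟨d, ds, hDe⟩ := List.exists_cons_of_ne_nil hDne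
    rw [hpref, hDe]
    simp [prefAux, PySem.List.pyGetD_zero_cons]
  have hcons0 : PySem.List.pyRange 0 (D.length : Int) 1
      = (0 : Int) :: PySem.List.pyRange 1 (D.length : Int) 1 := by
    have := PySem.List.pyRange_one_cons (a := 0) (b := (D.length : Int)) (by omega)
    simpa using this
  have hmain := loop_eq D pref hplen hrec 1 0 [] (le_refl 1) (by omega) (by omega)
  simp only [Nat.sub_self, Nat.cast_one, Nat.cast_zero] at hmain
  rw [show (1 : Int) - 0 = 1 from by ring, hp0] at hmain
  rw [PySem.List.slice_from_one]
  show solutionWhileA D 1 1 (PySem.List.pyGetD D 0 0) [] = diffs _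
  rw [hmain, List.nil_append, hcons0]
  simp only [List.filter_cons]
  norm_num
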